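-- pv_equiv track=rewrite | github.com/msmcs-robotics/WayfindR-driver | ambot/tests/gui_lidar.py | find_nearest_furthest
-- ===== SOURCE A (Python) =====
-- def find_nearest_furthest(scan_points, min_distance=50):
--     """Find the nearest and furthest points from scan data.
--
--     Args:
--         scan_points: List of (angle, distance, quality) tuples
--         min_distance: Minimum distance to consider (filters noise)
--
--     Returns:
--         (nearest_point, furthest_point) as (angle, distance, quality) or None
--     """
--     if not scan_points:
--         return None, None
--
--     # Filter valid points (above noise threshold)
--     valid_points = [p for p in scan_points if p[1] > min_distance]
--     if not valid_points:
--         return None, None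
--
--     nearest = min(valid_points, key=lambda p: p[1])
--     furthest = max(valid_points, key=lambda p: p[1])
--
--     return nearest, furthest
-- ===== SOURCE B (Python) =====
-- def find_nearest_furthest(scan_points, min_distance=50):
--     """One pass: track (nearest, furthest) together, skipping noise points."""
--     best = None
--     for p in scan_points:
--         if p[1] <= min_distance:
--             continue
--         if best is None:
--             best = (p, p)
--         else:
--             n, f = best
--             best = (p if p[1] < n[1] else n, p if f[1] < p[1] else f)
--     if best is None:
--         return None, None
--     return best
-- ===== Notes on version B (the rewrite author's own statement) =====
-- stated objective: alternative
-- what changed: Replaced the intermediate filtered list plus two separate min/max scans with a single pass maintaining one (nearest, furthest) accumulator, with strict comparisons preserving first-wins ties.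
import Mathlib
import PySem

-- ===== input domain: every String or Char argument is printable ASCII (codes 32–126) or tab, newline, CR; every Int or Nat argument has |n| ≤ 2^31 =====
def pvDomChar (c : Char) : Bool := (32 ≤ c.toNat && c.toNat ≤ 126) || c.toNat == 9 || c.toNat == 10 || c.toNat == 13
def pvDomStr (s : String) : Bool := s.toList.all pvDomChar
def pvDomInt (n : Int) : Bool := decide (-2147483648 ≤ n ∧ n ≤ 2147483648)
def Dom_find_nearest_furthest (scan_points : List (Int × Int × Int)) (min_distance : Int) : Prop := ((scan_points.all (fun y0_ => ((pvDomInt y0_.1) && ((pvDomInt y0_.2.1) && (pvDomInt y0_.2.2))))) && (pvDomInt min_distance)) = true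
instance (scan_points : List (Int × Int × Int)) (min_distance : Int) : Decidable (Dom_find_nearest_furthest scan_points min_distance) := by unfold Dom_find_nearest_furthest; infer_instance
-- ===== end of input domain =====

-- B replaces A's filtered list plus separate min/max scans by one pass with a single
-- (nearest, furthest) accumulator; same results, no intermediate list (objective: alternative).

-- ===== PORT A =====
def find_nearest_furthest (scan_points : List (Int × Int × Int)) (min_distance : Int) : (Option (Int × Int × Int)) × (Option (Int × Int × Int)) :=
  if scan_points = [] then (none, none)
  else
    let valid_points := scan_points.filter (fun p => decide (min_distance < p.2.1))
    if valid_points = [] then (none, none)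
    else (PySem.List.min? valid_points (fun p => p.2.1), PySem.List.max? valid_points (fun p => p.2.1))

-- ===== PORT B =====
def fnfStep (min_distance : Int) (acc : Option ((Int × Int × Int) × (Int × Int × Int))) (p : Int × Int × Int) : Option ((Int × Int × Int) × (Int × Int × Int)) :=
  if p.2.1 ≤ min_distance then acc
  else
    match acc with
    | none => some (p, p)
    | some (n, f) => some ((if p.2.1 < n.2.1 then p else n), (if f.2.1 < p.2.1 then p else f))

def find_nearest_furthest_alt (scan_points : List (Int × Int × Int)) (min_distance : Int) : (Option (Int × Int × Int)) × (Option (Int × Int × Int)) :=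
  match scan_points.foldl (fnfStep min_distance) none with
  | none => (none, none)
  | some (n, f) => (some n, some f)

-- ===== PRECONDITION & SPEC =====
def Spec_find_nearest_furthest (scan_points : List (Int × Int × Int)) (min_distance : Int) (out : (Option (Int × Int × Int)) × (Option (Int × Int × Int))) : Prop := out = find_nearest_furthest_alt scan_points min_distance
instance (scan_points : List (Int × Int × Int)) (min_distance : Int) (out : (Option (Int × Int × Int)) × (Option (Int × Int × Int))) : Decidable (Spec_find_nearest_furthest scan_points min_distance out) := by unfold Spec_find_nearest_furthest; infer_instance

-- ===== CLAIM (what is proved, stated in full; the proofs are below) =====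
def Claim_equal_find_nearest_furthest : Prop := ∀ (scan_points : List (Int × Int × Int)) (min_distance : Int), Dom_find_nearest_furthest scan_points min_distance → Spec_find_nearest_furthest scan_points min_distance (find_nearest_furthest scan_points min_distance)

-- ===== LEMMAS AND PROOFS =====

-- B's guarded fold equals the unguarded fold over the filtered list.
theorem fnf_fold_filter (md : Int) (l : List (Int × Int × Int))
    (acc : Option ((Int × Int × Int) × (Int × Int × Int))) :
    l.foldl (fnfStep md) acc
      = (l.filter (fun p => decide (md < p.2.1))).foldl
          (fun acc p =>
            match acc with
            | none => some (p, p)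
            | some (n, f) => some ((if p.2.1 < n.2.1 then p else n), (if f.2.1 < p.2.1 then p else f)))
          acc := by
  induction l generalizing acc with
  | nil => rfl
  | cons x t ih =>
    by_cases hx : md < x.2.1
    · simp [hx, fnfStep, not_le.mpr hx, ih]
    · simp [hx, fnfStep, not_lt.mp hx, ih]

-- The paired fold splits into the min-fold and max-fold.
theorem fnf_pair_split (l : List (Int × Int × Int)) (n f : Int × Int × Int) :
    l.foldl
        (fun acc p =>
          match acc with
          | none => some (p, p)
          | some (n, f) => some ((if p.2.1 < n.2.1 then p else n), (if f.2.1 < p.2.1 then p else f)))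
        (some (n, f))
      = some (l.foldl (fun m p => if p.2.1 < m.2.1 then p else m) n,
              l.foldl (fun m p => if m.2.1 < p.2.1 then p else m) f) := by
  induction l generalizing n f with
  | nil => rfl
  | cons x t ih => simp [List.foldl_cons, ih]

-- PySem min?/max? on a nonempty list are the running folds from the head.
theorem min?_cons_fold (x : Int × Int × Int) (t : List (Int × Int × Int)) :
    PySem.List.min? (x :: t) (fun p => p.2.1)
      = some (t.foldl (fun m p => if p.2.1 < m.2.1 then p else m) x) := by
  show List.foldl _ (some x) t = _
  induction t generalizing x with
  | nil => rfl
  | cons y t ih =>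
    show List.foldl _ (if y.2.1 < x.2.1 then some y else some x) t = _
    rw [List.foldl_cons]
    split <;> exact ih _

theorem max?_cons_fold (x : Int × Int × Int) (t : List (Int × Int × Int)) :
    PySem.List.max? (x :: t) (fun p => p.2.1)
      = some (t.foldl (fun m p => if m.2.1 < p.2.1 then p else m) x) := by
  show List.foldl _ (some x) t = _
  induction t generalizing x with
  | nil => rfl
  | cons y t ih =>
    show List.foldl _ (if x.2.1 < y.2.1 then some y else some x) t = _
    rw [List.foldl_cons]
    split <;> exact ih _

-- ===== VERDICT (by name: the statement is the Claim_ definition above) =====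
theorem find_nearest_furthest_spec : Claim_equal_find_nearest_furthest := by
  intro sp md _
  unfold Spec_find_nearest_furthest find_nearest_furthest find_nearest_furthest_alt
  rw [fnf_fold_filter]
  rcases sp with _ | ⟨y, ys⟩
  · rfl
  · rcases hv : (y :: ys).filter (fun p => decide (md < p.2.1)) with _ | ⟨x, t⟩
    · simp [hv]
    · rw [hv]
      simp [fnf_pair_split t x x, min?_cons_fold, max?_cons_fold]
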